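-- pv_equiv track=rewrite | github.com/XiangyangHe/yangyang_script | translate_url.py | url
-- ===== SOURCE A (Python) =====
-- def url(header, body):
--     d = {}
--     d["{"] = "%7B"
--     d["}"] = "%7D"
--     d["\""] = "%22"
--     d[":"] = "%3A"
--     d[","] = "%2C"
--     d["="] = "%3D"
--     for k, v in d.items():
--         body = body.replace(k, v)
--     return header + "&body=" + body
-- ===== SOURCE B (Python) =====
-- def url(header, body):
--     d = {"{": "%7B", "}": "%7D", "\"": "%22", ":": "%3A", ",": "%2C", "=": "%3D"}
--     return header + "&body=" + "".join(d.get(c, c) for c in body)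
-- ===== Notes on version B (the rewrite author's own statement) =====
-- stated objective: idiomatic
-- what changed: B makes a single character-wise pass over body, mapping each character through the table, instead of A's six sequential full-string replace passes.
import Mathlib
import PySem

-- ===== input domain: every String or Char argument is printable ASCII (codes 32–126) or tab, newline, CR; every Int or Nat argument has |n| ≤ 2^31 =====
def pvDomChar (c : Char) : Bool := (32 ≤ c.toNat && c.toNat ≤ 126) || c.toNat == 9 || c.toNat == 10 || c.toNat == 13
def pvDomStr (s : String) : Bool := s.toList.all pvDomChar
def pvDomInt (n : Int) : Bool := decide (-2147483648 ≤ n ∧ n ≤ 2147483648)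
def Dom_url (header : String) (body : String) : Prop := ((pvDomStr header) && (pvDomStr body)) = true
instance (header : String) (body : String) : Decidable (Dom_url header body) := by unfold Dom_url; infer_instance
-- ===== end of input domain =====

-- B replaces A's six sequential full-string replace passes by one character-wise pass mapping each character through the same table (idiomatic; return value identical).

-- ===== PORT A =====
def url (header : String) (body : String) : String :=
  header ++ "&body=" ++
    ((((((((PySem.Dict.empty : PySem.Dict String String).insert "{" "%7B").insert "}" "%7D").insert "\"" "%22").insert ":" "%3A").insert "," "%2C").insert "=" "%3D").items.foldl
      (fun b kv => PySem.Str.replace b kv.1 kv.2) body)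

-- ===== PORT B =====
def url_alt (header : String) (body : String) : String :=
  header ++ "&body=" ++ PySem.Str.join "" (body.toList.map (fun c =>
    (PySem.Dict.ofList [("{", "%7B"), ("}", "%7D"), ("\"", "%22"), (":", "%3A"), (",", "%2C"), ("=", "%3D")]
      : PySem.Dict String String).getD (String.ofList [c]) (String.ofList [c])))

-- ===== PRECONDITION & SPEC =====
def Spec_url (header : String) (body : String) (out : String) : Prop := out = url_alt header body
instance (header : String) (body : String) (out : String) : Decidable (Spec_url header body out) := by unfold Spec_url; infer_instance

-- ===== CLAIM (what is proved, stated in full; the proofs are below) =====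
def Claim_equal_url : Prop := ∀ (header : String) (body : String), Dom_url header body → Spec_url header body (url header body)

-- ===== LEMMAS AND PROOFS =====

-- replace with a single-character pattern is a per-character flatMap
theorem replace_go_single (k : Char) (v : List Char) :
    ∀ (fuel : Nat) (l acc : List Char), l.length ≤ fuel →
      PySem.Chars.replace.go [k] v fuel l acc
        = acc.reverse ++ l.flatMap (fun c => if c = k then v else [c]) := by
  intro fuel
  induction fuel with
  | zero =>
    intro l acc h
    have : l = [] := List.length_eq_zero_iff.mp (Nat.le_zero.mp h)
    subst this
    simp [PySem.Chars.replace.go]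
  | succ fuel ih =>
    intro l acc h
    cases l with
    | nil => simp [PySem.Chars.replace.go]
    | cons c t =>
      rw [PySem.Chars.replace.go]
      by_cases hc : c = k
      · subst hc
        have hp : [c].isPrefixOf (c :: t) = true := by
          simp [List.isPrefixOf]
        rw [if_pos hp]
        rw [ih _ _ (by simpa using Nat.le_of_succ_le_succ h)]
        simp
      · have hp : [k].isPrefixOf (c :: t) = false := by
          simp [List.isPrefixOf]
          exact fun hkc => absurd hkc.symm hc
        rw [if_neg (by simp [hp])]
        rw [ih _ _ (by simpa using Nat.le_of_succ_le_succ h)]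
        simp [hc]

theorem replace_single (cs : List Char) (k : Char) (v : List Char) :
    PySem.Chars.replace cs [k] v = cs.flatMap (fun c => if c = k then v else [c]) := by
  rw [PySem.Chars.replace]
  simp only [List.isEmpty_cons, if_false, Bool.false_eq_true]
  exact replace_go_single k v cs.length cs [] (le_refl _)

-- the six per-character substitutions of A, composed into B's single table map
def urlTable (c : Char) : List Char :=
  if c = '{' then ['%','7','B'] else if c = '}' then ['%','7','D']
  else if c = '"' then ['%','2','2'] else if c = ':' then ['%','3','A']
  else if c = ',' then ['%','2','C'] else if c = '=' then ['%','3','D'] else [c]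

def repl (k : Char) (v : List Char) : Char -> List Char := fun c => if c = k then v else [c]

theorem join_nil_flatten (l : List (List Char)) : PySem.Chars.join [] l = l.flatten := by
  induction l with
  | nil => rfl
  | cons a t ih =>
    cases t with
    | nil => simp [PySem.Chars.join, List.intercalate, List.intersperse]
    | cons b t2 =>
      simp only [PySem.Chars.join, List.intercalate, List.intersperse] at ih ⊢
      simp [ih]

theorem ofList_eq_brace_iff (c k : Char) : String.ofList [c] = String.ofList [k] ↔ c = k := by
  constructor
  · intro h
    have := congrArg String.toList h
    simpa using this
  · intro h; rw [h]

theorem alt_char (c : Char) :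
    ((PySem.Dict.ofList [("{", "%7B"), ("}", "%7D"), ("\"", "%22"), (":", "%3A"), (",", "%2C"), ("=", "%3D")]
        : PySem.Dict String String).getD (String.ofList [c]) (String.ofList [c])).toList
      = urlTable c := by
  by_cases h1 : c = '{'; · subst h1; rfl
  by_cases h2 : c = '}'; · subst h2; rfl
  by_cases h3 : c = '"'; · subst h3; rfl
  by_cases h4 : c = ':'; · subst h4; rfl
  by_cases h5 : c = ','; · subst h5; rfl
  by_cases h6 : c = '='; · subst h6; rfl
  have e1 : (("{" : String) == String.ofList [c]) = false := by
    rw [beq_eq_false_iff_ne]; intro h; exact h1 (((ofList_eq_brace_iff c '{').mp h.symm))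
  have e2 : (("}" : String) == String.ofList [c]) = false := by
    rw [beq_eq_false_iff_ne]; intro h; exact h2 (((ofList_eq_brace_iff c '}').mp h.symm))
  have e3 : (("\"" : String) == String.ofList [c]) = false := by
    rw [beq_eq_false_iff_ne]; intro h; exact h3 (((ofList_eq_brace_iff c '"').mp h.symm))
  have e4 : ((":" : String) == String.ofList [c]) = false := by
    rw [beq_eq_false_iff_ne]; intro h; exact h4 (((ofList_eq_brace_iff c ':').mp h.symm))
  have e5 : (("," : String) == String.ofList [c]) = false := by
    rw [beq_eq_false_iff_ne]; intro h; exact h5 (((ofList_eq_brace_iff c ',').mp h.symm))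
  have e6 : (("=" : String) == String.ofList [c]) = false := by
    rw [beq_eq_false_iff_ne]; intro h; exact h6 (((ofList_eq_brace_iff c '=').mp h.symm))
  have hd : (PySem.Dict.ofList [(("{" : String), ("%7B" : String)), ("}", "%7D"), ("\"", "%22"), (":", "%3A"), (",", "%2C"), ("=", "%3D")])
      = PySem.Dict.mk [("{", "%7B"), ("}", "%7D"), ("\"", "%22"), (":", "%3A"), (",", "%2C"), ("=", "%3D")] := by decide
  rw [hd]
  simp [PySem.Dict.getD, e1, e2, e3, e4, e5, e6, urlTable, h1, h2, h3, h4, h5, h6, PySem.Dict.get?]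

theorem table_comp (c : Char) :
    (repl '{' ['%','7','B'] c).flatMap (fun x =>
      (repl '}' ['%','7','D'] x).flatMap (fun x =>
        (repl '"' ['%','2','2'] x).flatMap (fun x =>
          (repl ':' ['%','3','A'] x).flatMap (fun x =>
            (repl ',' ['%','2','C'] x).flatMap (repl '=' ['%','3','D'])))))
      = urlTable c := by
  by_cases h1 : c = '{'; · subst h1; rfl
  by_cases h2 : c = '}'; · subst h2; rfl
  by_cases h3 : c = '"'; · subst h3; rfl
  by_cases h4 : c = ':'; · subst h4; rfl
  by_cases h5 : c = ','; · subst h5; rfl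
  by_cases h6 : c = '='; · subst h6; rfl
  simp [repl, urlTable, h1, h2, h3, h4, h5, h6]

theorem repl_toList (s : String) (k : Char) (v : List Char) (kv vv : String)
    (hk : kv.toList = [k]) (hv : vv.toList = v) :
    (PySem.Str.replace s kv vv).toList = s.toList.flatMap (repl k v) := by
  rw [PySem.Str.replace, hk, hv, replace_single]
  simp only [String.toList_ofList]
  rfl

set_option maxHeartbeats 2000000 in
theorem url_spec : Claim_equal_url := by
  intro header body _
  show url header body = url_alt header body
  have hitems : (((((((PySem.Dict.empty : PySem.Dict String String).insert "{" "%7B").insert "}" "%7D").insert "\"" "%22").insert ":" "%3A").insert "," "%2C").insert "=" "%3D").items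
      = [("{", "%7B"), ("}", "%7D"), ("\"", "%22"), (":", "%3A"), (",", "%2C"), ("=", "%3D")] := by decide
  unfold url url_alt
  rw [hitems]
  rw [List.foldl_cons, List.foldl_cons, List.foldl_cons, List.foldl_cons, List.foldl_cons,
      List.foldl_cons, List.foldl_nil]
  refine congrArg (fun s => header ++ "&body=" ++ s) ?_
  apply String.toList_inj.mp
  rw [repl_toList _ '=' ['%','3','D'] "=" "%3D" (by decide) (by decide),
      repl_toList _ ',' ['%','2','C'] "," "%2C" (by decide) (by decide),
      repl_toList _ ':' ['%','3','A'] ":" "%3A" (by decide) (by decide),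
      repl_toList _ '"' ['%','2','2'] "\"" "%22" (by decide) (by decide),
      repl_toList _ '}' ['%','7','D'] "}" "%7D" (by decide) (by decide),
      repl_toList _ '{' ['%','7','B'] "{" "%7B" (by decide) (by decide)]
  simp only [List.flatMap_assoc, table_comp]
  rw [PySem.Str.join]
  simp only [String.toList_ofList, List.map_map]
  rw [show ("" : String).toList = ([] : List Char) from by decide]
  rw [join_nil_flatten, ← List.flatMap_def]
  simp only [Function.comp_def, alt_char]
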